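-- pv_equiv track=rewrite | github.com/patiza604/universal-manual-rag-chat | chatbot_backend/training/scripts/content_extractor.py | _classify_status_mechanism
-- ===== SOURCE A (Python) =====
-- def _classify_status_mechanism(indicator: str) -> str:
--     """Classify the type of status mechanism"""
--     indicator_lower = indicator.lower()
--
--     if any(term in indicator_lower for term in ['led', 'light', 'lamp']):
--         return 'visual_led'
--     elif any(term in indicator_lower for term in ['display', 'screen', 'monitor']):
--         return 'visual_display'
--     elif any(term in indicator_lower for term in ['beep', 'sound', 'chime', 'alert']):
--         return 'audio'
--     elif any(term in indicator_lower for term in ['vibration', 'vibrate']):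
--         return 'haptic'
--     else:
--         return 'visual_other'
-- ===== SOURCE B (Python) =====
-- _TERM_TO_CATEGORY = {
--     'led': 'visual_led', 'light': 'visual_led', 'lamp': 'visual_led',
--     'display': 'visual_display', 'screen': 'visual_display', 'monitor': 'visual_display',
--     'beep': 'audio', 'sound': 'audio', 'chime': 'audio', 'alert': 'audio',
--     'vibration': 'haptic', 'vibrate': 'haptic',
-- }
-- _PRIORITY = ['visual_led', 'visual_display', 'audio', 'haptic']
--
--
-- def _classify_status_mechanism(indicator: str) -> str:
--     """Classify by a single scan over the string: at each position record which
--     category's term starts there, then return the highest-priority matched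
--     category (or 'visual_other')."""
--     s = indicator.lower()
--     matched = set()
--     for i in range(len(s)):
--         for term, category in _TERM_TO_CATEGORY.items():
--             if s.startswith(term, i):
--                 matched.add(category)
--     for category in _PRIORITY:
--         if category in matched:
--             return category
--     return 'visual_other'
-- ===== Notes on version B (the rewrite author's own statement) =====
-- stated objective: alternative
-- what changed: Instead of running a substring search per keyword in an if/elif cascade, B makes one scan over the positions of the lowered string, collecting into a set every category whose term starts at the current position, and then selects the first matched category in priority order.
import Mathlib
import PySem

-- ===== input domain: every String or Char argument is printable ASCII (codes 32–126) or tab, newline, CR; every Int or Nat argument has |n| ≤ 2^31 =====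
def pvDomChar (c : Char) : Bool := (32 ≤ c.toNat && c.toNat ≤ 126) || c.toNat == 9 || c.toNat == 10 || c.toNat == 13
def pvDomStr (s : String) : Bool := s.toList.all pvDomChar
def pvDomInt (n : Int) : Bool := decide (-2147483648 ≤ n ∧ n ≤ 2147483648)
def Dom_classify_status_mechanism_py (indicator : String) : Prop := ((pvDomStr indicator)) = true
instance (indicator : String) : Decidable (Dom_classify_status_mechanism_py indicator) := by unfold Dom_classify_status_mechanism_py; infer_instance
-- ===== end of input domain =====

-- B replaces A's per-keyword substring searches by one scan over the string's positions that
-- collects every matched category into a set, followed by a priority-ordered selection (alternative decomposition; same cost).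

-- ===== PORT A =====
def classify_status_mechanism_py (indicator : String) : String :=
  let indicator_lower := PySem.Str.lower indicator
  if ["led", "light", "lamp"].any (fun term => PySem.Str.isIn term indicator_lower) then
    "visual_led"
  else if ["display", "screen", "monitor"].any (fun term => PySem.Str.isIn term indicator_lower) then
    "visual_display"
  else if ["beep", "sound", "chime", "alert"].any (fun term => PySem.Str.isIn term indicator_lower) then
    "audio"
  else if ["vibration", "vibrate"].any (fun term => PySem.Str.isIn term indicator_lower) then
    "haptic"
  else
    "visual_other"

-- ===== PORT B =====
def pvTermCat : List (List Char × String) :=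
  [("led".toList, "visual_led"), ("light".toList, "visual_led"), ("lamp".toList, "visual_led"),
   ("display".toList, "visual_display"), ("screen".toList, "visual_display"), ("monitor".toList, "visual_display"),
   ("beep".toList, "audio"), ("sound".toList, "audio"), ("chime".toList, "audio"), ("alert".toList, "audio"),
   ("vibration".toList, "haptic"), ("vibrate".toList, "haptic")]

def pvPriority : List String := ["visual_led", "visual_display", "audio", "haptic"]

-- the scanning loop: for i in range(len(s)): for term, category in items: if s.startswith(term, i): matched.add(category)
-- (s.startswith(term, i) with 0 ≤ i < len(s) is exactly 'term is a prefix of s[i:]', i.e. Chars.startswith (s.drop i) term)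
def pvScan (s : List Char) : PySem.Set String :=
  (List.range s.length).foldl (fun acc i =>
    pvTermCat.foldl (fun acc tc =>
      if PySem.Chars.startswith (s.drop i) tc.1 then PySem.Set.add acc tc.2 else acc) acc)
    PySem.Set.empty

def classify_status_mechanism_py_alt (indicator : String) : String :=
  let matched := pvScan (PySem.Str.lower indicator).toList
  match pvPriority.find? (fun c => PySem.Set.contains matched c) with
  | some c => c
  | none => "visual_other"

-- ===== PRECONDITION & SPEC =====
def Spec_classify_status_mechanism_py (indicator : String) (out : String) : Prop := out = classify_status_mechanism_py_alt indicator
instance (indicator : String) (out : String) : Decidable (Spec_classify_status_mechanism_py indicator out) := by unfold Spec_classify_status_mechanism_py; infer_instance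

-- ===== CLAIM (what is proved, stated in full; the proofs are below) =====
def Claim_equal_classify_status_mechanism_py : Prop := ∀ (indicator : String), Dom_classify_status_mechanism_py indicator → Spec_classify_status_mechanism_py indicator (classify_status_mechanism_py indicator)

-- ===== LEMMAS AND PROOFS =====

-- membership in the inner fold (add-under-condition over the term table)
theorem pv_mem_inner (l : List (List Char × String)) (p : List Char → Bool)
    (acc : PySem.Set String) (x : String) :
    x ∈ l.foldl (fun acc tc => if p tc.1 then PySem.Set.add acc tc.2 else acc) acc ↔
      x ∈ acc ∨ ∃ tc ∈ l, p tc.1 = true ∧ tc.2 = x := by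
  induction l generalizing acc with
  | nil => simp
  | cons hd tl ih =>
    by_cases h : p hd.1 = true
    · simp [List.foldl_cons, h, ih, PySem.Set.mem_add]
      tauto
    · simp [List.foldl_cons, h, ih]

-- membership in the whole scan
theorem pv_mem_scan (s : List Char) (idxs : List Nat) (acc : PySem.Set String) (x : String) :
    x ∈ idxs.foldl (fun acc i =>
        pvTermCat.foldl (fun acc tc =>
          if PySem.Chars.startswith (s.drop i) tc.1 then PySem.Set.add acc tc.2 else acc) acc) acc ↔
      x ∈ acc ∨ ∃ i ∈ idxs, ∃ tc ∈ pvTermCat, PySem.Chars.startswith (s.drop i) tc.1 = true ∧ tc.2 = x := by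
  induction idxs generalizing acc with
  | nil => simp
  | cons hd tl ih =>
    simp only [List.foldl_cons, ih, pv_mem_inner, List.mem_cons]
    constructor
    · rintro ((hx | ⟨tc, htc, hp, he⟩) | ⟨i, hi, tc, htc, hp, he⟩)
      · exact Or.inl hx
      · exact Or.inr ⟨hd, Or.inl rfl, tc, htc, hp, he⟩
      · exact Or.inr ⟨i, Or.inr hi, tc, htc, hp, he⟩
    · rintro (hx | ⟨i, rfl | hi, tc, htc, hp, he⟩)
      · exact Or.inl (Or.inl hx)
      · exact Or.inl (Or.inr ⟨tc, htc, hp, he⟩)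
      · exact Or.inr ⟨i, hi, tc, htc, hp, he⟩

-- a nonempty term starts at some position below the length iff it is a substring
theorem pv_exists_lt_prefix_iff (sub s : List Char) (hs : sub ≠ []) :
    (∃ i < s.length, sub <+: s.drop i) ↔ PySem.Chars.isIn sub s = true := by
  rw [← PySem.Chars.exists_prefix_drop_iff_isIn]
  constructor
  · rintro ⟨i, _, h⟩; exact ⟨i, h⟩
  · rintro ⟨j, hj⟩
    by_cases hlt : j < s.length
    · exact ⟨j, hlt, hj⟩
    · exfalso
      rw [List.drop_eq_nil_of_le (le_of_not_gt hlt)] at hj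
      exact hs (List.prefix_nil.mp hj)

-- a category is in the matched set iff one of its terms occurs as a substring
theorem pv_contains_scan (s : List Char) (c : String) :
    PySem.Set.contains (pvScan s) c = true ↔
      ∃ tc ∈ pvTermCat, tc.2 = c ∧ PySem.Chars.isIn tc.1 s = true := by
  rw [PySem.Set.contains_iff]
  unfold pvScan
  rw [pv_mem_scan]
  constructor
  · rintro (hx | ⟨i, hi, tc, htc, hp, he⟩)
    · simp [PySem.Set.empty] at hx
    · refine ⟨tc, htc, he, ?_⟩
      rw [← pv_exists_lt_prefix_iff tc.1 s (by fin_cases htc <;> simp)]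
      exact ⟨i, List.mem_range.mp hi, (PySem.Chars.startswith_iff _ _).mp hp⟩
  · rintro ⟨tc, htc, he, hin⟩
    obtain ⟨i, hilt, hpre⟩ :=
      (pv_exists_lt_prefix_iff tc.1 s (by fin_cases htc <;> simp)).mpr hin
    exact Or.inr ⟨i, List.mem_range.mpr hilt, tc, htc, (PySem.Chars.startswith_iff _ _).mpr hpre, he⟩

theorem pv_scan_led (s : List Char) :
    PySem.Set.contains (pvScan s) "visual_led" =
      (PySem.Chars.isIn "led".toList s || (PySem.Chars.isIn "light".toList s || PySem.Chars.isIn "lamp".toList s)) := by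
  rw [Bool.eq_iff_iff, pv_contains_scan]; simp [pvTermCat]

theorem pv_scan_display (s : List Char) :
    PySem.Set.contains (pvScan s) "visual_display" =
      (PySem.Chars.isIn "display".toList s || (PySem.Chars.isIn "screen".toList s || PySem.Chars.isIn "monitor".toList s)) := by
  rw [Bool.eq_iff_iff, pv_contains_scan]; simp [pvTermCat]

theorem pv_scan_audio (s : List Char) :
    PySem.Set.contains (pvScan s) "audio" =
      (PySem.Chars.isIn "beep".toList s || (PySem.Chars.isIn "sound".toList s || (PySem.Chars.isIn "chime".toList s || PySem.Chars.isIn "alert".toList s))) := by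
  rw [Bool.eq_iff_iff, pv_contains_scan]; simp [pvTermCat]

theorem pv_scan_haptic (s : List Char) :
    PySem.Set.contains (pvScan s) "haptic" =
      (PySem.Chars.isIn "vibration".toList s || PySem.Chars.isIn "vibrate".toList s) := by
  rw [Bool.eq_iff_iff, pv_contains_scan]; simp [pvTermCat]

-- ===== VERDICT (by name: the statement is the Claim_ definition above) =====
theorem classify_status_mechanism_py_spec : Claim_equal_classify_status_mechanism_py := by
  intro indicator _
  unfold Spec_classify_status_mechanism_py classify_status_mechanism_py classify_status_mechanism_py_alt
  simp only [pvPriority, List.find?, List.any_cons, List.any_nil, PySem.Str.isIn_eq, Bool.or_false,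
    pv_scan_led, pv_scan_display, pv_scan_audio, pv_scan_haptic]
  cases h1 : (PySem.Chars.isIn "led".toList (PySem.Str.lower indicator).toList || (PySem.Chars.isIn "light".toList (PySem.Str.lower indicator).toList || PySem.Chars.isIn "lamp".toList (PySem.Str.lower indicator).toList)) <;>
  cases h2 : (PySem.Chars.isIn "display".toList (PySem.Str.lower indicator).toList || (PySem.Chars.isIn "screen".toList (PySem.Str.lower indicator).toList || PySem.Chars.isIn "monitor".toList (PySem.Str.lower indicator).toList)) <;>
  cases h3 : (PySem.Chars.isIn "beep".toList (PySem.Str.lower indicator).toList || (PySem.Chars.isIn "sound".toList (PySem.Str.lower indicator).toList || (PySem.Chars.isIn "chime".toList (PySem.Str.lower indicator).toList || PySem.Chars.isIn "alert".toList (PySem.Str.lower indicator).toList))) <;>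
  cases h4 : (PySem.Chars.isIn "vibration".toList (PySem.Str.lower indicator).toList || PySem.Chars.isIn "vibrate".toList (PySem.Str.lower indicator).toList) <;>
  simp
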